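-- pv_equiv track=rewrite | github.com/r3-yamauchi/dify-kintone-plugin | tools/kintone_flatten_json.py | _looks_like_records_list
-- ===== SOURCE A (Python) =====
-- from typing import Any, Dict, List, Optional
--
-- def _looks_like_records_list(payload: List[Any]) -> bool:
--     if not payload:
--         return True
--
--     score = 0
--     for element in payload:
--         if not isinstance(element, dict):
--             return False
--         for value in element.values():
--             if isinstance(value, dict) and (
--                 "value" in value or "type" in value
--             ):
--                 score += 1
--                 break
--     return score > 0
-- ===== SOURCE B (Python) =====
-- def _looks_like_records_list(payload):
--     if not payload:
--         return True
--     if not all(isinstance(e, dict) for e in payload):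
--         return False
--     return any(
--         isinstance(v, dict) and ("value" in v or "type" in v)
--         for e in payload
--         for v in e.values()
--     )
-- ===== Notes on version B (the rewrite author's own statement) =====
-- stated objective: simpler
-- what changed: Replaces the fused score-accumulating loop with inner break by two short-circuiting passes: an all() pass checking every element is a dict, then an any() existence pass over the flattened values.
import Mathlib
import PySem

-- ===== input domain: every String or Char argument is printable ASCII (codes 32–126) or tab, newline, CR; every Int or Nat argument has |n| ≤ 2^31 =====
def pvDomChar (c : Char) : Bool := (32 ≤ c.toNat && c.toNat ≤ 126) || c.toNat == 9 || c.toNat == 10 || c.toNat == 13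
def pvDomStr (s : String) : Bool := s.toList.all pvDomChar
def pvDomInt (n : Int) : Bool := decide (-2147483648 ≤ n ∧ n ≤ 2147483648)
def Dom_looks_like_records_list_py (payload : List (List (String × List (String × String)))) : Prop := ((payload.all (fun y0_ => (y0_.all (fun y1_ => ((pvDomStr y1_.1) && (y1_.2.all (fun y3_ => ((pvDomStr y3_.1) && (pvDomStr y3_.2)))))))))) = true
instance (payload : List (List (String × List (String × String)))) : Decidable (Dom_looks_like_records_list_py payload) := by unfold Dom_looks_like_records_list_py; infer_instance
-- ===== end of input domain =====

-- B replaces A's fused score-accumulating loop (with an inner break) by two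
-- short-circuiting passes: an all() type check, then an any() existence check
-- over the flattened values; objective: simpler.

-- ===== PORT A =====
-- inner 'for value in element.values(): if … : score += 1; break'
def pvInnerA (vs : List (List (String × String))) (score : Nat) : Nat :=
  match vs with
  | [] => score
  | v :: rest =>
    if (PySem.Dict.ofList v).contains "value" || (PySem.Dict.ofList v).contains "type" then
      score + 1
    else pvInnerA rest score

-- outer 'for element in payload' (the isinstance(element, dict) guard is
-- always satisfied under the typed domain); element.values() goes through
-- PySem.Dict.ofList to reproduce Python dict key-overwrite semantics.
def pvLoopA (elems : List (List (String × List (String × String)))) (score : Nat) : Nat :=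
  match elems with
  | [] => score
  | e :: rest => pvLoopA rest (pvInnerA (PySem.Dict.ofList e).values score)

def looks_like_records_list_py (payload : List (List (String × List (String × String)))) : Bool :=
  if payload = [] then true
  else decide (pvLoopA payload 0 > 0)

-- ===== PORT B =====
def looks_like_records_list_py_alt (payload : List (List (String × List (String × String)))) : Bool :=
  if payload.isEmpty then true
  -- 'all(isinstance(e, dict) for e in payload)': vacuously true under the typed domain
  else if ¬ payload.all (fun _ => true) then false
  else payload.any (fun e =>
    (PySem.Dict.ofList e).values.any (fun v =>
      (PySem.Dict.ofList v).contains "value" || (PySem.Dict.ofList v).contains "type"))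

-- ===== PRECONDITION & SPEC =====
def Spec_looks_like_records_list_py (payload : List (List (String × List (String × String)))) (out : Bool) : Prop := out = looks_like_records_list_py_alt payload
instance (payload : List (List (String × List (String × String)))) (out : Bool) : Decidable (Spec_looks_like_records_list_py payload out) := by unfold Spec_looks_like_records_list_py; infer_instance

-- ===== CLAIM (what is proved, stated in full; the proofs are below) =====
def Claim_equal_looks_like_records_list_py : Prop := ∀ (payload : List (List (String × List (String × String)))), Dom_looks_like_records_list_py payload → Spec_looks_like_records_list_py payload (looks_like_records_list_py payload)

-- ===== LEMMAS AND PROOFS =====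

def pvPred (v : List (String × String)) : Bool :=
  (PySem.Dict.ofList v).contains "value" || (PySem.Dict.ofList v).contains "type"

theorem pvInnerA_eq (vs : List (List (String × String))) (s : Nat) :
    pvInnerA vs s = s + (if vs.any pvPred then 1 else 0) := by
  induction vs with
  | nil => simp [pvInnerA]
  | cons v rest ih =>
    by_cases h : pvPred v = true
    · simp [pvInnerA, pvPred] at h ⊢
      rcases h with h | h <;> simp [h]
    · simp only [pvPred] at h
      simp [pvInnerA, h, ih, pvPred]

def pvElemPred (e : List (String × List (String × String))) : Bool :=
  (PySem.Dict.ofList e).values.any pvPred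

theorem pvLoopA_eq (l : List (List (String × List (String × String)))) (s : Nat) :
    pvLoopA l s = s + l.countP pvElemPred := by
  induction l generalizing s with
  | nil => simp [pvLoopA]
  | cons e rest ih =>
    simp only [pvLoopA, ih, pvInnerA_eq, List.countP_cons, pvElemPred]
    by_cases h : (PySem.Dict.ofList e).values.any pvPred = true <;> simp [h] <;> try omega

-- ===== VERDICT (by name: the statement is the Claim_ definition above) =====
theorem looks_like_records_list_py_spec : Claim_equal_looks_like_records_list_py := by
  intro payload _
  unfold Spec_looks_like_records_list_py looks_like_records_list_py looks_like_records_list_py_alt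
  by_cases hp : payload = []
  · simp [hp]
  · simp only [hp, if_false, List.isEmpty_eq_false_iff.mpr hp, Bool.false_eq_true,
      List.all_eq_true]
    rw [Bool.eq_iff_iff]
    simp [pvLoopA_eq, List.countP_pos_iff, List.any_eq_true, pvElemPred, pvPred]
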